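-- pv_equiv track=rewrite | github.com/talni/Detection-of-Groups-with-Biased-Representation-in-Ranking | Coding/Algorithms/IterTD_PropBounds.py | AddDominatedToLowerbound
-- ===== SOURCE A (Python) =====
-- def P1DominatedByP2(P1, P2):
--     length = len(P1)
--     for i in range(length):
--         if P1[i] == -1:
--             if P2[i] != -1:
--                 return False
--         if P1[i] != -1:
--             if P2[i] != P1[i] and P2[i] != -1:
--                 return False
--     return True
--
-- def AddDominatedToLowerbound(pattern, pattern_treated_unfairly, dominated_by_result):
--     to_remove = []
--     for p in pattern_treated_unfairly:
--         # if PatternEqual(p, pattern):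
--         #     return
--         if P1DominatedByP2(pattern, p):
--             return False
--         elif P1DominatedByP2(p, pattern):
--             to_remove.append(p)
--     for p in to_remove:
--         pattern_treated_unfairly.remove(p)
--     pattern_treated_unfairly.append(pattern)
--     return True
-- ===== SOURCE B (Python) =====
-- def _dominates(P1, P2):
--     # True iff P1DominatedByP2 would return True: P2 long enough and every
--     # paired entry of P2 is a wildcard (-1) or equals P1's entry.
--     return len(P1) <= len(P2) and all(b == -1 or b == a for a, b in zip(P1, P2))
--
-- def AddDominatedToLowerbound(pattern, pattern_treated_unfairly, dominated_by_result):
--     # pass 1: is the new pattern dominated by anything already kept?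
--     if any(_dominates(pattern, p) for p in pattern_treated_unfairly):
--         return False
--     # pass 2: drop everything the new pattern dominates, in place, then append
--     pattern_treated_unfairly[:] = [p for p in pattern_treated_unfairly
--                                    if not _dominates(p, pattern)]
--     pattern_treated_unfairly.append(pattern)
--     return True
-- ===== Notes on version B (the rewrite author's own statement) =====
-- stated objective: simpler
-- what changed: Replaces A's interleaved index-loop helper and single loop with a deferred to_remove list and quadratic list.remove by a zip/all closed-form domination predicate used in two separate passes: an any() scan deciding the return value, then one in-place filter comprehension plus append.
import Mathlib
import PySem

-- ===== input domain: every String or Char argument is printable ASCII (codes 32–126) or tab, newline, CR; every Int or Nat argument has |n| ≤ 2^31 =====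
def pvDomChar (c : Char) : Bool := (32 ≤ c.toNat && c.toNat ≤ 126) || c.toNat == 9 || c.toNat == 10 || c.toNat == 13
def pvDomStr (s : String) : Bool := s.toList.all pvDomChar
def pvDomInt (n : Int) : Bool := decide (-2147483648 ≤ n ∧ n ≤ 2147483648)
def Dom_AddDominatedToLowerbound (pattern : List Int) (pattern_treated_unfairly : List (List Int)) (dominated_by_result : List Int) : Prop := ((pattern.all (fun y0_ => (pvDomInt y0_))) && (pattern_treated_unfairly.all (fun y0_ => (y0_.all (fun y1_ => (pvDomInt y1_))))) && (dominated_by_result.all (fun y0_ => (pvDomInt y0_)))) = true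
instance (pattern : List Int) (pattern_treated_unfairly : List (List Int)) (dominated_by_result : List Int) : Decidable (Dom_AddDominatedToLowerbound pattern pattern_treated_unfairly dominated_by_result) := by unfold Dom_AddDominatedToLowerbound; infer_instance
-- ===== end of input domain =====

-- B replaces A's interleaved index-loop helper and single loop (deferred to_remove list +
-- quadratic list.remove) by a zip/all domination predicate used in two separate passes: an
-- any() scan deciding the return value, then one in-place filter plus append (objective:
-- simpler). Both A and B mutate pattern_treated_unfairly in place with the same net effect
-- on the stated domain; the equivalence proved here is about the RETURN value.


-- ===== PORT A =====
-- A's helper P1DominatedByP2: index loop over range(len(P1)); P2[i] is exact via getD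
-- inside Pre_ (the index is in range wherever Python does not raise)
def P1DomByAux (P1 P2 : List Int) (i : Nat) : Bool :=
  if h : i < P1.length then
    if P1[i]'h = -1 then
      (if P2.getD i 0 ≠ -1 then false else P1DomByAux P1 P2 (i+1))
    else
      (if P2.getD i 0 ≠ P1[i]'h ∧ P2.getD i 0 ≠ -1 then false else P1DomByAux P1 P2 (i+1))
  else true
termination_by P1.length - i

def P1DomBy (P1 P2 : List Int) : Bool := P1DomByAux P1 P2 0

-- A's loop: return False on the first p dominating pattern, otherwise accumulate to_remove
def addAuxA (pattern : List Int) (ps : List (List Int)) (to_remove : List (List Int)) : Bool :=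
  match ps with
  | [] => true   -- loop done: remove the to_remove patterns, append, return True
  | p :: rest =>
    if P1DomBy pattern p then false
    else if P1DomBy p pattern then addAuxA pattern rest (to_remove ++ [p])
    else addAuxA pattern rest to_remove

def AddDominatedToLowerbound (pattern : List Int) (pattern_treated_unfairly : List (List Int)) (dominated_by_result : List Int) : Bool :=
  addAuxA pattern pattern_treated_unfairly []

-- ===== PORT B =====
-- B's helper _dominates: length check plus all() over zip — a closed-form predicate,
-- no index recursion
def dominatesB (P1 P2 : List Int) : Bool :=
  decide (P1.length ≤ P2.length) && (P1.zip P2).all (fun ab => ab.2 == -1 || ab.2 == ab.1)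

-- pass 1: any() scan decides the return value; pass 2 (filter + append) only mutates
def AddDominatedToLowerbound_alt (pattern : List Int) (pattern_treated_unfairly : List (List Int)) (dominated_by_result : List Int) : Bool :=
  if pattern_treated_unfairly.any (fun p => dominatesB pattern p) then false else true

-- ===== PRECONDITION & SPEC =====
-- the per-index failure test of P1DominatedByP2, and closed-form conditions for the helper
-- returning (vs raising IndexError) and for it returning True
def pvFail (a b : Int) : Bool := if a = -1 then decide (b ≠ -1) else (decide (b ≠ a) && decide (b ≠ -1))
def pvHelperReturns (P1 P2 : List Int) : Bool := decide (P1.length ≤ P2.length) || (P1.zip P2).any (fun ab => pvFail ab.1 ab.2)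
def pvHelperTrue (P1 P2 : List Int) : Bool := decide (P1.length ≤ P2.length) && (P1.zip P2).all (fun ab => !pvFail ab.1 ab.2)
def pvPairSafe (pattern p : List Int) : Bool := pvHelperReturns pattern p && (pvHelperTrue pattern p || pvHelperReturns p pattern)
-- Pre_ excludes exactly the inputs on which Python A raises IndexError (a member of mismatched
-- length reached by the loop without an earlier disagreement); it admits every input A returns on.
def Pre_AddDominatedToLowerbound (pattern : List Int) (pattern_treated_unfairly : List (List Int)) (dominated_by_result : List Int) : Prop :=
  ∀ k < pattern_treated_unfairly.length,
    (∀ j < k, pvHelperTrue pattern (pattern_treated_unfairly.getD j []) = false) →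
    pvPairSafe pattern (pattern_treated_unfairly.getD k []) = true

instance (pattern : List Int) (pattern_treated_unfairly : List (List Int)) (dominated_by_result : List Int) : Decidable (Pre_AddDominatedToLowerbound pattern pattern_treated_unfairly dominated_by_result) := by unfold Pre_AddDominatedToLowerbound; infer_instance

def pvWitness_AddDominatedToLowerbound : List Int × List (List Int) × List Int :=
  ([1, -1], [[1, 2], [-1, -1]], [0])

def Spec_AddDominatedToLowerbound (pattern : List Int) (pattern_treated_unfairly : List (List Int)) (dominated_by_result : List Int) (out : Bool) : Prop := out = AddDominatedToLowerbound_alt pattern pattern_treated_unfairly dominated_by_result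
instance (pattern : List Int) (pattern_treated_unfairly : List (List Int)) (dominated_by_result : List Int) (out : Bool) : Decidable (Spec_AddDominatedToLowerbound pattern pattern_treated_unfairly dominated_by_result out) := by unfold Spec_AddDominatedToLowerbound; infer_instance

-- ===== CLAIM (what is proved, stated in full; the proofs are below) =====
def Claim_equal_AddDominatedToLowerbound : Prop := ∀ (pattern : List Int) (pattern_treated_unfairly : List (List Int)) (dominated_by_result : List Int), Dom_AddDominatedToLowerbound pattern pattern_treated_unfairly dominated_by_result → Pre_AddDominatedToLowerbound pattern pattern_treated_unfairly dominated_by_result → Spec_AddDominatedToLowerbound pattern pattern_treated_unfairly dominated_by_result (AddDominatedToLowerbound pattern pattern_treated_unfairly dominated_by_result)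

-- ===== LEMMAS AND PROOFS =====
-- B's per-pair pass test is the negation of A's per-pair failure test
theorem pass_eq_not_fail (a b : Int) : ((b == -1 || b == a)) = !pvFail a b := by
  unfold pvFail
  by_cases ha : a = -1 <;> by_cases hb : b = -1 <;> by_cases hab : b = a <;> simp_all

-- A's index-loop helper, characterised from position i, under the condition that Python's
-- loop does not raise (length fits, or a failing pair stops it first)
theorem domAux_char (n : Nat) : ∀ (P1 P2 : List Int) (i : Nat), P1.length - i ≤ n →
    (P1.length ≤ P2.length ∨ ((P1.zip P2).drop i).any (fun ab => pvFail ab.1 ab.2) = true) →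
    P1DomByAux P1 P2 i =
      (decide (P1.length ≤ P2.length) && ((P1.zip P2).drop i).all (fun ab => ab.2 == -1 || ab.2 == ab.1)) := by
  induction n with
  | zero =>
    intro P1 P2 i hle h
    have hi : P1.length ≤ i := by omega
    have hz : ((P1.zip P2).drop i) = [] := by
      apply List.drop_eq_nil_of_le
      simp [List.length_zip]; omega
    rw [P1DomByAux]
    rw [dif_neg (by omega)]
    rcases h with h | h
    · simp [hz, h]
    · rw [hz] at h; simp at h
  | succ n ih =>
    intro P1 P2 i hle h
    by_cases hi : i < P1.length
    · by_cases hi2 : i < P2.length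
      · have hiz : i < (P1.zip P2).length := by simp [List.length_zip]; omega
        have hdrop : ((P1.zip P2).drop i) = (P1.zip P2)[i] :: ((P1.zip P2).drop (i+1)) :=
          List.drop_eq_getElem_cons hiz
        have hget : (P1.zip P2)[i] = (P1[i]'hi, P2[i]'hi2) := by
          simp [List.getElem_zip]
        have hgetD : P2.getD i 0 = P2[i]'hi2 := List.getD_eq_getElem P2 0 hi2
        rw [P1DomByAux, dif_pos hi]
        by_cases hfail : pvFail (P1[i]'hi) (P2[i]'hi2) = true
        · -- failing pair: A returns false here, B's all is false
          have hpass : ((P2[i]'hi2 == -1 || P2[i]'hi2 == P1[i]'hi)) = false := by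
            rw [pass_eq_not_fail, hfail]; rfl
          have hrhs : (((P1.zip P2).drop i).all (fun ab => ab.2 == -1 || ab.2 == ab.1)) = false := by
            rw [hdrop]; simp [hget, hpass]
          rw [hrhs, Bool.and_false, hgetD]
          unfold pvFail at hfail
          by_cases ha : P1[i]'hi = -1
          · rw [if_pos ha] at hfail ⊢
            simp only [decide_eq_true_eq] at hfail
            rw [if_pos hfail]
          · rw [if_neg ha] at hfail
            simp only [Bool.and_eq_true, decide_eq_true_eq] at hfail
            rw [if_neg ha, if_pos hfail]
        · -- passing pair: recurse
          have hpass : ((P2[i]'hi2 == -1 || P2[i]'hi2 == P1[i]'hi)) = true := by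
            rw [pass_eq_not_fail]; simp [hfail]
          have hnext : P1.length ≤ P2.length ∨ ((P1.zip P2).drop (i+1)).any (fun ab => pvFail ab.1 ab.2) = true := by
            rcases h with h | h
            · exact Or.inl h
            · rw [hdrop] at h; simp [hget] at h
              rcases h with h | h
              · exact absurd h hfail
              · exact Or.inr (by simpa using h)
          have hA := ih P1 P2 (i+1) (by omega) hnext
          rw [hdrop]
          simp only [List.all_cons, hget, hpass, Bool.true_and]
          rw [hgetD]
          have hp : P2[i]'hi2 = -1 ∨ P2[i]'hi2 = P1[i]'hi := by
            simpa using hpass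
          by_cases ha : P1[i]'hi = -1
          · rw [if_pos ha, if_neg (by rcases hp with hp | hp <;> simp [hp, ha])]
            exact hA
          · rw [if_neg ha, if_neg (by rcases hp with hp | hp <;> simp [hp])]
            exact hA
      · -- P2 exhausted before P1: the Python loop would raise here; hypothesis rules it out
        have hz : ((P1.zip P2).drop i) = [] := by
          apply List.drop_eq_nil_of_le
          simp [List.length_zip]; omega
        rcases h with h | h
        · omega
        · rw [hz] at h; simp at h
    · -- i past P1: loop done, helper returns True
      have hz : ((P1.zip P2).drop i) = [] := by
        apply List.drop_eq_nil_of_le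
        simp [List.length_zip]; omega
      rw [P1DomByAux, dif_neg hi]
      rcases h with h | h
      · simp [hz, h]
      · rw [hz] at h; simp at h

-- wherever Python's helper returns, A's port of it equals B's closed-form predicate
theorem P1DomBy_eq_dominatesB (P1 P2 : List Int) (h : pvHelperReturns P1 P2 = true) :
    P1DomBy P1 P2 = dominatesB P1 P2 := by
  unfold pvHelperReturns at h
  simp only [Bool.or_eq_true, decide_eq_true_eq] at h
  have := domAux_char P1.length P1 P2 0 (by omega)
    (by simpa using h)
  simpa [P1DomBy, dominatesB] using this

-- pvHelperTrue is dominatesB (the pair tests are negations of each other)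
theorem helperTrue_eq_dominatesB (P1 P2 : List Int) : pvHelperTrue P1 P2 = dominatesB P1 P2 := by
  unfold pvHelperTrue dominatesB
  simp only [pass_eq_not_fail]

-- peel one element off Pre_
theorem pre_cons (pattern : List Int) (p : List Int) (rest : List (List Int)) (dbr : List Int)
    (h : Pre_AddDominatedToLowerbound pattern (p :: rest) dbr) :
    pvPairSafe pattern p = true ∧
    (pvHelperTrue pattern p = false → Pre_AddDominatedToLowerbound pattern rest dbr) := by
  constructor
  · have := h 0 (by simp) (by omega)
    simpa using this
  · intro hp k hk hprev
    have := h (k+1) (by simpa using Nat.succ_lt_succ hk) ?_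
    · simpa using this
    · intro j hj
      cases j with
      | zero => simpa using hp
      | succ j => have := hprev j (by omega); simpa using this

-- A's loop value is independent of the accumulator and, inside Pre_, equals
-- "no member B-dominates pattern"
theorem addAuxA_char (pattern : List Int) (dbr : List Int) :
    ∀ (ps : List (List Int)) (acc : List (List Int)),
      Pre_AddDominatedToLowerbound pattern ps dbr →
      addAuxA pattern ps acc = !(ps.any (fun p => dominatesB pattern p)) := by
  intro ps
  induction ps with
  | nil => intro acc _; simp [addAuxA]
  | cons p rest ih =>
    intro acc hpre
    obtain ⟨hsafe, hrest⟩ := pre_cons pattern p rest dbr hpre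
    unfold pvPairSafe at hsafe
    simp only [Bool.and_eq_true, Bool.or_eq_true] at hsafe
    have heq : P1DomBy pattern p = dominatesB pattern p := P1DomBy_eq_dominatesB pattern p hsafe.1
    simp only [addAuxA, List.any_cons]
    by_cases hd : dominatesB pattern p = true
    · simp [heq, hd]
    · simp only [Bool.not_eq_true] at hd
      have htrue : pvHelperTrue pattern p = false := by
        rw [helperTrue_eq_dominatesB]; exact hd
      have hpre' := hrest htrue
      rw [if_neg (by simp [heq, hd])]
      by_cases h2 : P1DomBy p pattern = true <;>
        simp [h2, ih _ hpre', hd]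

-- ===== VERDICT (by name: the statement is the Claim_ definition above) =====
theorem AddDominatedToLowerbound_spec : Claim_equal_AddDominatedToLowerbound := by
  intro pattern ptu dbr _ hpre
  unfold Spec_AddDominatedToLowerbound AddDominatedToLowerbound AddDominatedToLowerbound_alt
  rw [addAuxA_char pattern dbr ptu [] hpre]
  by_cases h : ptu.any (fun p => dominatesB pattern p) = true <;> simp [h]
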